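-- pv_equiv track=rewrite | github.com/sproutsai-engg/coding_question_generator | json_files/python_codes/Q_939.py | find_valid_permutations
-- ===== SOURCE A (Python) =====
-- def find_valid_permutations(s: str) -> int:
--     n = len(s)
--     MOD = 1000000007
--     dp = [0] * (n + 2)
--     dp[0] = 1
--
--     for c in s:
--         new_dp = [0] * (n + 2)
--         if c == 'I':
--             for i in range(n):
--                 new_dp[i + 1] = (new_dp[i + 1] + dp[i]) % MOD
--         else:
--             for i in range(n - 1, -1, -1):
--                 new_dp[i] = (new_dp[i + 1] + dp[i + 1]) % MOD
--         dp = new_dp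
--
--     return dp[0]
-- ===== SOURCE B (Python) =====
-- def find_valid_permutations(s: str) -> int:
--     MOD = 1000000007
--     n = len(s)
--     memo = {}
--
--     def f(k, i):
--         if k == 0:
--             return 1 if i == 0 else 0
--         if (k, i) in memo:
--             return memo[(k, i)]
--         c = s[k - 1]
--         if c == 'I':
--             v = f(k - 1, i - 1) if i >= 1 else 0
--         else:
--             v = sum(f(k - 1, j) for j in range(i + 1, n + 2)) % MOD
--         memo[(k, i)] = v
--         return v
--
--     return f(n, 0)
-- ===== Notes on version B (the rewrite author's own statement) =====
-- stated objective: alternative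
-- what changed: Replaces A's bottom-up rolling-array DP (two in-place index loops rewriting a preallocated row per character) with a top-down memoized recursion f(k,i) over (step,index): f(0,i) is 1 iff i is 0, an increase character consumes one index (f(k-1,i-1)), any other character sums f(k-1,j) over j from i+1 to n+1 modulo 1e9+7, cached in a dictionary; the answer is f(n,0).
import Mathlib
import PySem

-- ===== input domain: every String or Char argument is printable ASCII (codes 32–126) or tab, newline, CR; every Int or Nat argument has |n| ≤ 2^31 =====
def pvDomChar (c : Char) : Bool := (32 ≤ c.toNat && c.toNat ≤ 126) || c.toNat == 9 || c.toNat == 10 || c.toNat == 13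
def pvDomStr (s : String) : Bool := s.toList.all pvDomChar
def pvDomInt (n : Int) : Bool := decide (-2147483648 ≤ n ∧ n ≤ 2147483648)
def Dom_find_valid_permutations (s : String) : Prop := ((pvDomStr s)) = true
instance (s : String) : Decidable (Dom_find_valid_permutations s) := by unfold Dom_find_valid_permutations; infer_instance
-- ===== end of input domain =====

-- B replaces A's bottom-up rolling-array DP with a top-down memoized recursion over
-- (step, index) cached in a dictionary (objective: alternative decomposition, not faster).

-- ===== PORT A =====
-- loop body of A's 'for c in s': builds new_dp from dp (all indices used by the Python are in range,
-- so dp[i] / new_dp[i] are PySem.List.pyGetD / pySetD with default never reached)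
def pvStepA (n : Nat) (dp : List Int) (c : Char) : List Int :=
  let new_dp : List Int := List.replicate (n + 2) 0
  if c = 'I' then
    -- for i in range(n): new_dp[i+1] = (new_dp[i+1] + dp[i]) % MOD
    (PySem.List.pyRange 0 (n : Int) 1).foldl (fun nd i =>
      PySem.List.pySetD nd (i + 1)
        (PySem.Int.mod (PySem.List.pyGetD nd (i + 1) 0 + PySem.List.pyGetD dp i 0) 1000000007)) new_dp
  else
    -- for i in range(n-1, -1, -1): new_dp[i] = (new_dp[i+1] + dp[i+1]) % MOD
    (PySem.List.pyRange ((n : Int) - 1) (-1) (-1)).foldl (fun nd i =>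
      PySem.List.pySetD nd i
        (PySem.Int.mod (PySem.List.pyGetD nd (i + 1) 0 + PySem.List.pyGetD dp (i + 1) 0) 1000000007)) new_dp

def find_valid_permutations (s : String) : Int :=
  let n := s.toList.length
  -- dp = [0] * (n + 2); dp[0] = 1
  let dp : List Int := PySem.List.pySetD (List.replicate (n + 2) 0) 0 1
  let dp := s.toList.foldl (pvStepA n) dp
  PySem.List.pyGetD dp 0 0   -- return dp[0] (dp has length n+2 ≥ 2, in range)

-- ===== PORT B =====
-- Source B's memoized recursion f(k, i) with the dict 'memo' threaded through the computation;
-- Python's k is the first Nat argument (k+1 in the successor case), s[k-1] is pyGetD s k ' '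
-- (k < n always holds on the calls Source B makes, so the default is never read).
def pvF (s : List Char) (n : Nat) : Nat → Int → PySem.Dict (Nat × Int) Int → Int × PySem.Dict (Nat × Int) Int
  | 0, i, m => (if i = 0 then 1 else 0, m)
  | k + 1, i, m =>
    match m.get? (k + 1, i) with
    | some v => (v, m)
    | none =>
      let c := PySem.List.pyGetD s k ' '
      let r :=
        if c = 'I' then
          if 1 ≤ i then pvF s n k (i - 1) m else (0, m)
        else
          -- v = sum(f(k - 1, j) for j in range(i + 1, n + 2)) % MOD
          let p := (PySem.List.pyRange (i + 1) ((n : Int) + 2) 1).foldl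
            (fun (st : Int × PySem.Dict (Nat × Int) Int) j =>
              let q := pvF s n k j st.2
              (st.1 + q.1, q.2)) (0, m)
          (PySem.Int.mod p.1 1000000007, p.2)
      (r.1, r.2.insert (k + 1, i) r.1)

def find_valid_permutations_alt (s : String) : Int :=
  (pvF s.toList s.toList.length s.toList.length 0 PySem.Dict.empty).1

-- ===== PRECONDITION & SPEC =====
def Spec_find_valid_permutations (s : String) (out : Int) : Prop := out = find_valid_permutations_alt s
instance (s : String) (out : Int) : Decidable (Spec_find_valid_permutations s out) := by unfold Spec_find_valid_permutations; infer_instance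

-- ===== CLAIM (what is proved, stated in full; the proofs are below) =====
def Claim_equal_find_valid_permutations : Prop := ∀ (s : String), Dom_find_valid_permutations s → Spec_find_valid_permutations s (find_valid_permutations s)

-- ===== LEMMAS AND PROOFS =====

-- the pure (memo-free) value of Source B's f(k, i)
def pvG (s : List Char) (n : Nat) : Nat → Int → Int
  | 0, i => if i = 0 then 1 else 0
  | k + 1, i =>
    if PySem.List.pyGetD s k ' ' = 'I' then
      if 1 ≤ i then pvG s n k (i - 1) else 0
    else
      PySem.Int.mod (((PySem.List.pyRange (i + 1) ((n : Int) + 2) 1).map (pvG s n k)).sum) 1000000007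

-- every entry of the memo is the pure value
def pvMemoOK (s : List Char) (n : Nat) (m : PySem.Dict (Nat × Int) Int) : Prop :=
  ∀ (p : Nat × Int) (v : Int), m.get? p = some v → v = pvG s n p.1 p.2

-- the memoized recursion returns the pure value and keeps the memo correct
lemma pvF_correct (s : List Char) (n : Nat) :
    ∀ (k : Nat) (i : Int) (m : PySem.Dict (Nat × Int) Int), pvMemoOK s n m →
      (pvF s n k i m).1 = pvG s n k i ∧ pvMemoOK s n (pvF s n k i m).2 := by
  intro k
  induction k with
  | zero => intro i m hm; exact ⟨rfl, hm⟩
  | succ k ih =>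
    intro i m hm
    have hins : ∀ (m' : PySem.Dict (Nat × Int) Int) (v : Int), pvMemoOK s n m' →
        v = pvG s n (k + 1) i → pvMemoOK s n (m'.insert (k + 1, i) v) := by
      intro m' v h hv p w hw
      rw [PySem.Dict.get?_insert] at hw
      split at hw
      · next heq =>
        cases hw
        rw [heq, hv]
      · exact h _ _ hw
    have hfold : ∀ (js : List Int) (a : Int) (m' : PySem.Dict (Nat × Int) Int), pvMemoOK s n m' →
        (js.foldl (fun (st : Int × PySem.Dict (Nat × Int) Int) j =>
          let q := pvF s n k j st.2
          (st.1 + q.1, q.2)) (a, m')).1 = a + (js.map (pvG s n k)).sum ∧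
        pvMemoOK s n ((js.foldl (fun (st : Int × PySem.Dict (Nat × Int) Int) j =>
          let q := pvF s n k j st.2
          (st.1 + q.1, q.2)) (a, m')).2) := by
      intro js
      induction js with
      | nil => intro a m' h; exact ⟨by simp, h⟩
      | cons j t iht =>
        intro a m' h
        simp only [List.foldl_cons, List.map_cons, List.sum_cons]
        obtain ⟨h1, h2⟩ := ih j m' h
        obtain ⟨h3, h4⟩ := iht (a + (pvF s n k j m').1) _ h2
        exact ⟨by rw [h3, h1]; ring, h4⟩
    cases hget : m.get? (k + 1, i) with
    | some v =>
      simp only [pvF, hget]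
      exact ⟨hm _ _ hget, hm⟩
    | none =>
      simp only [pvF, hget]
      by_cases hc : PySem.List.pyGetD s k ' ' = 'I'
      · rw [if_pos hc]
        by_cases hi : 1 ≤ i
        · rw [if_pos hi]
          obtain ⟨h1, h2⟩ := ih (i - 1) m hm
          have hval : (pvF s n k (i - 1) m).1 = pvG s n (k + 1) i := by
            rw [h1]
            conv_rhs => rw [pvG]
            rw [if_pos hc, if_pos hi]
          exact ⟨hval, hins _ _ h2 hval⟩
        · rw [if_neg hi]
          have hval : (0 : Int) = pvG s n (k + 1) i := by
            conv_rhs => rw [pvG]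
            rw [if_pos hc, if_neg hi]
          exact ⟨hval, hins _ _ hm hval⟩
      · rw [if_neg hc]
        obtain ⟨h1, h2⟩ := hfold (PySem.List.pyRange (i + 1) ((n : Int) + 2) 1) 0 m hm
        have hval : PySem.Int.mod ((PySem.List.pyRange (i + 1) ((n : Int) + 2) 1).foldl
            (fun (st : Int × PySem.Dict (Nat × Int) Int) j =>
              let q := pvF s n k j st.2
              (st.1 + q.1, q.2)) (0, m)).1 1000000007 = pvG s n (k + 1) i := by
          rw [h1]
          conv_rhs => rw [pvG]
          rw [if_neg hc]
          norm_num
        exact ⟨hval, hins _ _ h2 hval⟩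

-- === A's rows ===
-- row after the first k characters of s
def pvRow (s : List Char) (n : Nat) : Nat → List Int
  | 0 => PySem.List.pySetD (List.replicate (n + 2) 0) 0 1
  | k + 1 => pvStepA n (pvRow s n k) (PySem.List.pyGetD s k ' ')

-- closed functional forms of pvStepA's two branches (proof-side only)
def pvStepC (n : Nat) (dp : List Int) (c : Char) : List Int :=
  if c = 'I' then
    0 :: ((PySem.List.slice dp none (some (n : Int))).map (fun x => PySem.Int.mod x 1000000007) ++ [0])
  else
    let p := ((PySem.List.slice dp (some (1 : Int)) (some ((n : Int) + 1))).reverse).foldl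
      (fun (st : List Int × Int) x =>
        let acc := PySem.Int.mod (st.2 + x) 1000000007
        (st.1 ++ [acc], acc)) ([0, 0], 0)
    p.1.reverse

-- proof-side name for the D-branch fold body
def pvBodyD (st : List Int × Int) (x : Int) : List Int × Int :=
  (st.1 ++ [PySem.Int.mod (st.2 + x) 1000000007], PySem.Int.mod (st.2 + x) 1000000007)

lemma pvBodyD_eq : (fun (st : List Int × Int) x =>
    let acc := PySem.Int.mod (st.2 + x) 1000000007
    (st.1 ++ [acc], acc)) = pvBodyD := rfl

-- the append-fold is a scan: its first component accumulates onto the initial list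
lemma pvFoldB_scan (ys : List Int) (l : List Int) (a : Int) :
    ys.foldl pvBodyD (l, a) =
      (l ++ (ys.foldl pvBodyD ([], a)).1, (ys.foldl pvBodyD ([], a)).2) := by
  induction ys generalizing l a with
  | nil => simp
  | cons x ys ih =>
    simp only [List.foldl_cons, pvBodyD, List.nil_append]
    rw [ih, ih [PySem.Int.mod (a + x) 1000000007]]
    simp

-- the slice dp[1:n+1] in closed form
lemma pvSliceD (n : Nat) (dp : List Int) :
    PySem.List.slice dp (some (1 : Int)) (some ((n : Int) + 1)) = (dp.drop 1).take n := by
  have h := PySem.List.slice_natCast dp 1 (n + 1)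
  push_cast at h
  simpa using h

lemma pvFoldB_fst_len (ys : List Int) (a : Int) :
    ((ys.foldl pvBodyD ([], a)).1).length = ys.length := by
  induction ys generalizing a with
  | nil => simp
  | cons x ys ih =>
    simp only [List.foldl_cons, pvBodyD, List.nil_append]
    rw [pvFoldB_scan]
    simp [ih]

-- invariant of A's ascending 'I' loop: after m steps, slots 1..m hold dp[i] % MOD, the rest is 0
lemma pvI_inv (n : Nat) (dp : List Int) (h : dp.length = n + 2) :
    ∀ m, m ≤ n →
    (List.range m).foldl (fun nd (k : Nat) =>
      PySem.List.pySetD nd ((k : Int) + 1)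
        (PySem.Int.mod (PySem.List.pyGetD nd ((k : Int) + 1) 0 + PySem.List.pyGetD dp (k : Int) 0)
          1000000007)) (List.replicate (n + 2) 0)
    = 0 :: ((dp.take m).map (fun x => PySem.Int.mod x 1000000007) ++ List.replicate (n + 1 - m) 0) := by
  intro m
  induction m with
  | zero => intro _; simp [List.replicate_succ]
  | succ m ih =>
    intro hm
    rw [List.range_succ, List.foldl_append, ih (by omega)]
    simp only [List.foldl_cons, List.foldl_nil]
    have e1 : ((m : Int) + 1) = ((m + 1 : Nat) : Int) := by push_cast; ring
    have hrep : List.replicate (n + 1 - m) (0 : Int) = 0 :: List.replicate (n - m) 0 := by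
      rw [show n + 1 - m = (n - m) + 1 by omega, List.replicate_succ]
    have hlen : ((dp.take m).map (fun x => PySem.Int.mod x 1000000007)).length = m := by
      simp [h]; omega
    rw [e1, PySem.List.pySetD_natCast, PySem.List.pyGetD_natCast, PySem.List.pyGetD_natCast, hrep]
    have hget : (0 :: ((dp.take m).map (fun x => PySem.Int.mod x 1000000007) ++
        0 :: List.replicate (n - m) 0)).getD (m + 1) 0 = 0 := by
      rw [List.getD_cons_succ, ← hlen]
      simp [List.getD]
    rw [hget]
    have hset : (0 :: ((dp.take m).map (fun x => PySem.Int.mod x 1000000007) ++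
        0 :: List.replicate (n - m) 0)).set (m + 1)
          (PySem.Int.mod (0 + dp.getD m 0) 1000000007)
        = 0 :: (((dp.take m).map (fun x => PySem.Int.mod x 1000000007) ++
            [PySem.Int.mod (0 + dp.getD m 0) 1000000007]) ++ List.replicate (n - m) 0) := by
      rw [List.set_cons_succ, ← hlen]
      simp
    rw [hset]
    have htake : dp.take (m + 1) = dp.take m ++ [dp.getD m 0] := by
      rw [List.take_add_one]
      simp [List.getElem?_eq_getElem (show m < dp.length by omega)]
    rw [htake]
    simp

-- A's ascending 'I' loop fills slots 1..n with dp[i] % MOD and leaves 0 elsewhere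
lemma pvStepA_I (n : Nat) (dp : List Int) (h : dp.length = n + 2) :
    pvStepA n dp 'I' = pvStepC n dp 'I' := by
  unfold pvStepA pvStepC
  rw [if_pos rfl, if_pos rfl, PySem.List.pyRange_zero_natCast, List.foldl_map,
    PySem.List.slice_to_natCast]
  have := pvI_inv n dp h n le_rfl
  simp only [Nat.add_sub_cancel_left] at this
  simpa using this

-- element m of reversed(dp[1:n+1]) is dp[n-m]
lemma pvYs_getD (n m : Nat) (dp : List Int) (h : dp.length = n + 2) (hm : m < n) :
    (((dp.drop 1).take n).reverse).getD m 0 = dp.getD (n - m) 0 := by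
  have h1 : ((dp.drop 1).take n).length = n := by simp [h]
  have h2 : m < (((dp.drop 1).take n).reverse).length := by simp; omega
  rw [List.getD_eq_getElem _ _ h2, List.getElem_reverse,
    List.getD_eq_getElem _ _ (show n - m < dp.length by omega)]
  simp only [List.getElem_take, List.getElem_drop]
  congr 1
  omega

-- invariant of A's descending 'D' loop: after m steps it holds the reversed m-step suffix scan,
-- and the scan's accumulator sits at the front of the reversed scan list
lemma pvD_inv (n : Nat) (dp : List Int) (h : dp.length = n + 2) :
    ∀ m, m ≤ n →
    (List.range m).foldl (fun nd (k : Nat) =>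
      PySem.List.pySetD nd ((n : Int) - 1 - k)
        (PySem.Int.mod (PySem.List.pyGetD nd ((n : Int) - 1 - k + 1) 0
          + PySem.List.pyGetD dp ((n : Int) - 1 - k + 1) 0) 1000000007))
      (List.replicate (n + 2) 0)
    = List.replicate (n - m) 0 ++
        ((((((dp.drop 1).take n).reverse.take m).foldl pvBodyD ([], 0)).1).reverse ++ [0, 0])
    ∧ (((((dp.drop 1).take n).reverse.take m).foldl pvBodyD ([], 0)).1).reverse.getD 0 0
        = ((((dp.drop 1).take n).reverse.take m).foldl pvBodyD ([], 0)).2 := by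
  intro m
  induction m with
  | zero =>
    intro _
    refine ⟨?_, by simp⟩
    rw [List.replicate_add]
    rfl
  | succ m ih =>
    intro hm
    obtain ⟨ih1, ih2⟩ := ih (by omega)
    set ys := ((dp.drop 1).take n).reverse with hys
    have hyslen : ys.length = n := by simp [hys, h]
    have htk : ys.take (m + 1) = ys.take m ++ [ys.getD m 0] := by
      rw [List.take_add_one]
      simp [List.getElem?_eq_getElem (show m < ys.length by omega)]
    have hsplit : (ys.take (m + 1)).foldl pvBodyD ([], 0) =
        (((ys.take m).foldl pvBodyD ([], 0)).1 ++
          [PySem.Int.mod (((ys.take m).foldl pvBodyD ([], 0)).2 + ys.getD m 0) 1000000007],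
         PySem.Int.mod (((ys.take m).foldl pvBodyD ([], 0)).2 + ys.getD m 0) 1000000007) := by
      rw [htk, List.foldl_append]
      simp [pvBodyD]
    have hLlen : (((ys.take m).foldl pvBodyD ([], 0)).1).length = m := by
      rw [pvFoldB_fst_len, List.length_take]
      omega
    have hread : (List.replicate (n - m) (0:Int) ++
        (((((ys.take m).foldl pvBodyD ([], 0)).1).reverse) ++ [0, 0])).getD (n - m) 0
        = ((ys.take m).foldl pvBodyD ([], 0)).2 := by
      rw [List.getD_append_right _ _ _ _ (by simp), List.length_replicate, Nat.sub_self]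
      rcases hL : (((ys.take m).foldl pvBodyD ([], 0)).1).reverse with _ | ⟨x, t⟩
      · have hm0 : m = 0 := by
          have := hLlen
          rw [← List.length_reverse, hL] at this
          simpa using this.symm
        subst hm0
        simp
      · rw [← ih2, hL]
        simp
    constructor
    · rw [List.range_succ, List.foldl_append, ih1]
      simp only [List.foldl_cons, List.foldl_nil]
      have e1 : (n : Int) - 1 - m = ((n - 1 - m : Nat) : Int) := by omega
      have e2 : (n : Int) - 1 - m + 1 = ((n - m : Nat) : Int) := by omega
      rw [e2, e1, PySem.List.pySetD_natCast, PySem.List.pyGetD_natCast, PySem.List.pyGetD_natCast,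
        hread, hsplit]
      have hyd : ys.getD m 0 = dp.getD (n - m) 0 := pvYs_getD n m dp h (by omega)
      rw [← hyd]
      have hrep : List.replicate (n - m) (0:Int) = List.replicate (n - 1 - m) 0 ++ [0] := by
        rw [← List.replicate_succ']
        congr 1
        omega
      rw [hrep]
      rw [show (List.replicate (n - 1 - m) (0:Int) ++ [0]) ++
            ((((ys.take m).foldl pvBodyD ([], 0)).1).reverse ++ [0, 0])
          = List.replicate (n - 1 - m) (0:Int) ++ 0 ::
            ((((ys.take m).foldl pvBodyD ([], 0)).1).reverse ++ [0, 0]) by simp]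
      rw [List.set_append_right _ _
        (show (List.replicate (n - 1 - m) (0:Int)).length ≤ n - 1 - m by simp)]
      simp only [List.length_replicate, Nat.sub_self, List.set_cons_zero]
      rw [show n - (m + 1) = n - 1 - m by omega]
      simp
    · rw [hsplit]
      simp

-- A's descending 'D' loop equals the reversed suffix scan
lemma pvStepA_D (n : Nat) (dp : List Int) (c : Char) (h : dp.length = n + 2) (hc : ¬ c = 'I') :
    pvStepA n dp c = pvStepC n dp c := by
  unfold pvStepA pvStepC
  rw [if_neg hc, if_neg hc]
  rw [show PySem.List.pyRange ((n : Int) - 1) (-1) (-1)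
      = (List.range n).map (fun (k : Nat) => (n : Int) - 1 - (k : Int)) by
    rw [PySem.List.pyRange_neg_one, show (((n : Int) - 1) - (-1)).toNat = n by omega]]
  rw [List.foldl_map]
  simp only [pvBodyD_eq, pvSliceD]
  rw [pvFoldB_scan]
  have hys : (((dp.drop 1).take n).reverse).take n = ((dp.drop 1).take n).reverse := by
    apply List.take_of_length_le
    simp [h]
  obtain ⟨h1, _⟩ := pvD_inv n dp h n le_rfl
  rw [hys] at h1
  rw [h1]
  simp

lemma pvStep_eq (n : Nat) (dp : List Int) (c : Char) (h : dp.length = n + 2) :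
    pvStepA n dp c = pvStepC n dp c := by
  by_cases hc : c = 'I'
  · subst hc; exact pvStepA_I n dp h
  · exact pvStepA_D n dp c h hc

-- === chain / suffix-sum machinery for the D rows ===
def pvChain (ys : List Int) (a : Int) : Nat → Int
  | 0 => a
  | m + 1 => PySem.Int.mod (pvChain ys a m + ys.getD m 0) 1000000007

lemma pvChain_cons (y : Int) (t : List Int) (a : Int) :
    ∀ m, pvChain (y :: t) a (m + 1) = pvChain t (PySem.Int.mod (a + y) 1000000007) m := by
  intro m
  induction m with
  | zero => simp [pvChain]
  | succ m ih =>
    show PySem.Int.mod (pvChain (y :: t) a (m + 1) + (y :: t).getD (m + 1) 0) 1000000007 = _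
    rw [ih, List.getD_cons_succ]
    rfl

lemma pvFoldB_closed (ys : List Int) : ∀ a : Int,
    ys.foldl pvBodyD ([], a) =
      ((List.range ys.length).map (fun m => pvChain ys a (m + 1)), pvChain ys a ys.length) := by
  induction ys with
  | nil => intro a; simp [pvChain]
  | cons y t ih =>
    intro a
    simp only [List.foldl_cons, pvBodyD, List.nil_append]
    rw [pvFoldB_scan, ih]
    simp only [List.length_cons]
    rw [Prod.mk.injEq]
    constructor
    · rw [List.range_succ_eq_map, List.map_cons, List.map_map, List.singleton_append,
        List.cons.injEq]
      constructor
      · simp [pvChain]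
      · apply List.map_congr_left
        intro m _
        simp only [Function.comp_apply, Nat.succ_eq_add_one]
        exact (pvChain_cons y t a (m + 1)).symm
    · exact (pvChain_cons y t a t.length).symm

lemma pvChain_sum (ys : List Int) : ∀ m : Nat,
    pvChain ys 0 m = (((List.range m).map (fun t => ys.getD t 0)).sum) % 1000000007 := by
  intro m
  induction m with
  | zero => simp [pvChain]
  | succ m ih =>
    rw [pvChain, ih, PySem.Int.mod_eq_emod_of_pos (by norm_num), Int.emod_add_emod,
      List.range_succ, List.map_append, List.sum_append]
    simp

lemma pvSum_reflect (f : Nat → Int) (m : Nat) :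
    ((List.range m).map (fun t => f (m - 1 - t))).sum = ((List.range m).map f).sum := by
  have h : (List.range m).map (fun t => f (m - 1 - t)) = ((List.range m).map f).reverse := by
    apply List.ext_getElem
    · simp
    · intro t h1 h2
      simp only [List.length_map, List.length_range] at h1 h2
      simp only [List.getElem_map, List.getElem_range, List.getElem_reverse, List.length_map,
        List.length_range]
  rw [h, List.sum_reverse]

lemma pvModId (a : Int) (h0 : 0 ≤ a) (h1 : a < 1000000007) :
    PySem.Int.mod a 1000000007 = a := by
  rw [PySem.Int.mod_eq_emod_of_pos (by norm_num), Int.emod_eq_of_lt h0 h1]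

lemma pvStepC_I_getD (n : Nat) (dp : List Int) (h : dp.length = n + 2) (j : Nat) :
    (pvStepC n dp 'I').getD j 0 =
      if 1 ≤ j ∧ j ≤ n then PySem.Int.mod (dp.getD (j - 1) 0) 1000000007 else 0 := by
  unfold pvStepC
  rw [if_pos rfl, PySem.List.slice_to_natCast]
  have hL : ((dp.take n).map (fun x => PySem.Int.mod x 1000000007)).length = n := by
    simp [h]
  cases j with
  | zero => simp
  | succ j =>
    rw [List.getD_cons_succ]
    by_cases hj : j < n
    · rw [List.getD_append _ _ _ _ (by omega), if_pos ⟨by omega, by omega⟩]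
      rw [List.getD_eq_getElem _ _ (by omega), List.getElem_map, List.getElem_take,
        List.getD_eq_getElem _ _ (by omega)]
      simp
    · rw [List.getD_append_right _ _ _ _ (by omega), if_neg (by omega), hL]
      rcases j - n with _ | t <;> simp [List.getD]

lemma pvStepC_D_getD (n : Nat) (dp : List Int) (h : dp.length = n + 2) (c : Char)
    (hc : ¬ c = 'I') (j : Nat) :
    (pvStepC n dp c).getD j 0 =
      if j < n then pvChain (((dp.drop 1).take n).reverse) 0 (n - j) else 0 := by
  unfold pvStepC
  rw [if_neg hc]
  simp only [pvBodyD_eq, pvSliceD]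
  rw [pvFoldB_scan, pvFoldB_closed]
  set ys := ((dp.drop 1).take n).reverse with hys
  have hyslen : ys.length = n := by simp [hys, h]
  simp only [hyslen, List.reverse_append]
  have hGlen : ((List.range n).map (fun m => pvChain ys 0 (m + 1))).reverse.length = n := by simp
  by_cases hj : j < n
  · rw [List.getD_append _ _ _ _ (by omega), if_pos hj]
    rw [List.getD_eq_getElem _ _ (by omega), List.getElem_reverse]
    simp only [List.getElem_map, List.getElem_range, List.length_map, List.length_range]
    congr 1
    omega
  · rw [List.getD_append_right _ _ _ _ (by omega), if_neg hj, hGlen]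
    rcases j - n with _ | _ | t <;> simp [List.getD]

lemma pvStepC_length (n : Nat) (dp : List Int) (h : dp.length = n + 2) (c : Char) :
    (pvStepC n dp c).length = n + 2 := by
  unfold pvStepC
  by_cases hc : c = 'I'
  · rw [if_pos hc, PySem.List.slice_to_natCast]
    simp [h]
  · rw [if_neg hc]
    simp only [pvBodyD_eq, pvSliceD]
    rw [pvFoldB_scan]
    simp only [List.length_reverse, List.length_append, pvFoldB_fst_len, List.length_take,
      List.length_drop, List.length_cons, List.length_nil, h]
    omega

-- the initial row [0]*(n+2) with dp[0] = 1
lemma pvRow_zero (n : Nat) :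
    PySem.List.pySetD (List.replicate (n + 2) 0) 0 (1 : Int) = 1 :: List.replicate (n + 1) 0 := by
  simp [List.replicate_succ, PySem.List.pySetD, PySem.List.pySet?, PySem.List.pyIdx?]
  split
  · rfl
  · omega

lemma pvRow_zero_getD (n : Nat) (j : Nat) :
    (PySem.List.pySetD (List.replicate (n + 2) 0) 0 (1 : Int)).getD j 0 =
      if j = 0 then 1 else 0 := by
  rw [pvRow_zero]
  cases j with
  | zero => simp
  | succ j =>
    rw [List.getD_cons_succ, if_neg (by omega)]
    by_cases hj : j < n + 1
    · rw [List.getD_eq_getElem _ _ (by simp; omega)]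
      simp
    · rw [List.getD_eq_default _ _ (by simp; omega)]

-- invariant bundle for a row
def pvInv (n k : Nat) (dp : List Int) : Prop :=
  dp.length = n + 2 ∧
  (∀ j : Nat, 0 ≤ dp.getD j 0 ∧ dp.getD j 0 < 1000000007) ∧
  (∀ j : Nat, k < j → dp.getD j 0 = 0)

-- main induction: the pure recursion pvG agrees with A's rows
lemma pvG_row (s : List Char) (n : Nat) (hn : n = s.length) :
    ∀ k, k ≤ n → pvInv n k (pvRow s n k) ∧
      (∀ i : Int, 0 ≤ i → i ≤ (n : Int) + 1 →
        pvG s n k i = (pvRow s n k).getD i.toNat 0) := by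
  intro k
  induction k with
  | zero =>
    intro _
    refine ⟨⟨?_, ?_, ?_⟩, ?_⟩
    · rw [pvRow, pvRow_zero]; simp
    · intro j
      rw [pvRow, pvRow_zero_getD]
      split_ifs <;> norm_num
    · intro j hj
      rw [pvRow, pvRow_zero_getD, if_neg (by omega)]
    · intro i h0 h1
      rw [pvG, pvRow, pvRow_zero_getD]
      by_cases hi : i = 0
      · rw [if_pos hi, if_pos (by omega)]
      · rw [if_neg hi, if_neg (by omega)]
  | succ k ih =>
    intro hk1
    obtain ⟨⟨hlen, hbnd, hzero⟩, hval⟩ := ih (by omega)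
    have hk : k < n := by omega
    have hrow : pvRow s n (k + 1) = pvStepC n (pvRow s n k) (PySem.List.pyGetD s (k : Int) ' ') :=
      pvStep_eq n (pvRow s n k) _ hlen
    by_cases hc : PySem.List.pyGetD s (k : Int) ' ' = 'I'
    · -- 'I' step
      have hget : ∀ j : Nat, (pvRow s n (k + 1)).getD j 0 =
          if 1 ≤ j ∧ j ≤ n then PySem.Int.mod ((pvRow s n k).getD (j - 1) 0) 1000000007 else 0 := by
        intro j
        rw [hrow, hc]
        exact pvStepC_I_getD n _ hlen j
      refine ⟨⟨?_, ?_, ?_⟩, ?_⟩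
      · rw [hrow]; exact pvStepC_length n _ hlen _
      · intro j
        rw [hget]
        split_ifs
        · rw [PySem.Int.mod_eq_emod_of_pos (by norm_num)]
          exact ⟨Int.emod_nonneg _ (by norm_num), Int.emod_lt_of_pos _ (by norm_num)⟩
        · norm_num
      · intro j hj
        rw [hget]
        split_ifs with hcnd
        · rw [hzero (j - 1) (by omega), pvModId 0 le_rfl (by norm_num)]
        · rfl
      · intro i h0 h1
        rw [pvG, if_pos hc, hget]
        by_cases hi : 1 ≤ i
        · rw [if_pos hi, hval (i - 1) (by omega) (by omega)]
          have htn : (i - 1).toNat = i.toNat - 1 := by omega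
          by_cases hle : i.toNat ≤ n
          · rw [if_pos ⟨by omega, hle⟩, htn]
            exact (pvModId _ (hbnd _).1 (hbnd _).2).symm
          · rw [if_neg (by omega), htn, show i.toNat - 1 = n by omega]
            exact hzero n hk
        · rw [if_neg hi, if_neg (by omega)]
    · -- 'D' step
      have hget : ∀ j : Nat, (pvRow s n (k + 1)).getD j 0 =
          if j < n then pvChain (((((pvRow s n k)).drop 1).take n).reverse) 0 (n - j) else 0 := by
        intro j
        rw [hrow]
        exact pvStepC_D_getD n _ hlen _ hc j
      have hchain : ∀ m, m ≤ n →
          pvChain (((((pvRow s n k)).drop 1).take n).reverse) 0 m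
            = (((List.range m).map (fun t => (pvRow s n k).getD (n - t) 0)).sum) % 1000000007 := by
        intro m hm
        rw [pvChain_sum]
        congr 1
        congr 1
        apply List.map_congr_left
        intro t ht
        rw [List.mem_range] at ht
        exact pvYs_getD n t _ hlen (by omega)
      refine ⟨⟨?_, ?_, ?_⟩, ?_⟩
      · rw [hrow]; exact pvStepC_length n _ hlen _
      · intro j
        rw [hget]
        split_ifs with hj
        · rw [hchain _ (by omega)]
          exact ⟨Int.emod_nonneg _ (by norm_num), Int.emod_lt_of_pos _ (by norm_num)⟩
        · norm_num
      · intro j hj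
        rw [hget]
        split_ifs with hj2
        · rw [hchain _ (by omega)]
          have hz : ((List.range (n - j)).map (fun t => (pvRow s n k).getD (n - t) 0)).sum = 0 := by
            apply List.sum_eq_zero
            intro x hx
            rw [List.mem_map] at hx
            obtain ⟨t, ht, rfl⟩ := hx
            rw [List.mem_range] at ht
            exact hzero (n - t) (by omega)
          rw [hz]
          simp
        · rfl
      · intro i h0 h1
        rw [pvG, if_neg hc, hget]
        have hmap : (PySem.List.pyRange (i + 1) ((n : Int) + 2) 1).map (pvG s n k)
            = (List.range (n + 1 - i.toNat)).map
                (fun t => (pvRow s n k).getD (i.toNat + 1 + t) 0) := by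
          rw [PySem.List.pyRange_one, List.map_map,
            show ((n : Int) + 2 - (i + 1)).toNat = n + 1 - i.toNat by omega]
          apply List.map_congr_left
          intro t ht
          rw [List.mem_range] at ht
          simp only [Function.comp_apply]
          rw [hval (i + 1 + t) (by omega) (by omega)]
          congr 1
          omega
        rw [hmap]
        by_cases hle : i.toNat ≤ n
        · have hsum : ((List.range (n + 1 - i.toNat)).map
              (fun t => (pvRow s n k).getD (i.toNat + 1 + t) 0)).sum
              = ((List.range (n - i.toNat)).map
                  (fun t => (pvRow s n k).getD (i.toNat + 1 + t) 0)).sum := by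
            rw [show n + 1 - i.toNat = (n - i.toNat) + 1 by omega, List.range_succ,
              List.map_append, List.sum_append]
            have hz : (pvRow s n k).getD (i.toNat + 1 + (n - i.toNat)) 0 = 0 :=
              hzero _ (by omega)
            simp only [List.map_cons, List.map_nil, List.sum_cons, List.sum_nil, add_zero]
            rw [hz, add_zero]
          rw [hsum]
          by_cases hlt : i.toNat < n
          · rw [if_pos hlt, hchain _ (by omega),
              PySem.Int.mod_eq_emod_of_pos (by norm_num)]
            congr 1
            have hre : (List.range (n - i.toNat)).map (fun t => (pvRow s n k).getD (n - t) 0)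
                = (List.range (n - i.toNat)).map
                    (fun t => (pvRow s n k).getD (i.toNat + 1 + ((n - i.toNat) - 1 - t)) 0) := by
              apply List.map_congr_left
              intro t ht
              rw [List.mem_range] at ht
              congr 1
              omega
            rw [hre, pvSum_reflect (fun t => (pvRow s n k).getD (i.toNat + 1 + t) 0) (n - i.toNat)]
          · rw [if_neg (by omega), show n - i.toNat = 0 by omega]
            simp
        · rw [if_neg (by omega), show n + 1 - i.toNat = 0 by omega]
          simp

lemma pvRow_fold (s : List Char) (n : Nat) (hn : n = s.length) :
    s.foldl (pvStepA n) (PySem.List.pySetD (List.replicate (n + 2) 0) 0 1) = pvRow s n n := by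
  have key : ∀ k, k ≤ s.length →
      (s.take k).foldl (pvStepA n) (PySem.List.pySetD (List.replicate (n + 2) 0) 0 1)
        = pvRow s n k := by
    intro k
    induction k with
    | zero => intro _; rfl
    | succ k ih =>
      intro hk
      have htake : s.take (k + 1) = s.take k ++ [s.getD k ' '] := by
        rw [List.take_add_one]
        simp [List.getElem?_eq_getElem (show k < s.length by omega)]
      rw [htake, List.foldl_append, ih (by omega)]
      show pvStepA n (pvRow s n k) (s.getD k ' ') = pvRow s n (k + 1)
      rw [show pvRow s n (k + 1) = pvStepA n (pvRow s n k) (PySem.List.pyGetD s (k : Int) ' ') from rfl,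
        PySem.List.pyGetD_natCast]
  have := key n (by omega)
  rwa [show s.take n = s by rw [hn]; exact List.take_length] at this

-- ===== VERDICT (by name: the statement is the Claim_ definition above) =====
theorem find_valid_permutations_spec : Claim_equal_find_valid_permutations := by
  intro s _
  show find_valid_permutations s = find_valid_permutations_alt s
  show PySem.List.pyGetD (s.toList.foldl (pvStepA s.toList.length)
      (PySem.List.pySetD (List.replicate (s.toList.length + 2) 0) 0 1)) 0 0
    = (pvF s.toList s.toList.length s.toList.length 0 PySem.Dict.empty).1
  rw [pvRow_fold s.toList s.toList.length rfl]
  have hemp : pvMemoOK s.toList s.toList.length PySem.Dict.empty := by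
    intro p v h
    rw [PySem.Dict.get?_empty] at h
    cases h
  rw [(pvF_correct s.toList s.toList.length s.toList.length 0 PySem.Dict.empty hemp).1,
    (pvG_row s.toList s.toList.length rfl s.toList.length le_rfl).2 0 le_rfl (by positivity)]
  exact PySem.List.pyGetD_zero _ _
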